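-- pv_equiv track=rewrite | github.com/amilbcahat/LeetCode-Answers | 0302-smallest-rectangle-enclosing-black-pixels/0302-smallest-rectangle-enclosing-black-pixels.py | binary_search_column
-- ===== SOURCE A (Python) =====
-- def binary_search_column(image, start, end, top, bottom, find_left):
--     while start < end:
--         mid = start + (end - start) // 2 if find_left else end - (end - start) // 2
--
--         # Check if this column has any black pixel
--         has_black = False
--         for i in range(top, bottom + 1):
--             if image[i][mid] == '1':
--                 has_black = True
--                 break
--
--         if has_black:
--             if find_left:
--                 end = mid  # Continue searching left
--             else:
--                 start = mid  # Continue searching right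
--         else:
--             if find_left:
--                 start = mid + 1  # Move right
--             else:
--                 end = mid - 1  # Move left
--
--     return start
-- ===== SOURCE B (Python) =====
-- def binary_search_column(image, start, end, top, bottom, find_left):
--     def go(lo, hi):
--         if lo >= hi:
--             return lo
--         mid = lo + (hi - lo) // 2 if find_left else hi - (hi - lo) // 2
--         hit = any(image[i][mid] == '1' for i in range(top, bottom + 1))
--         if find_left:
--             lo, hi = (lo, mid) if hit else (mid + 1, hi)
--         else:
--             lo, hi = (mid, hi) if hit else (lo, mid - 1)
--         return go(lo, hi)
--     return go(start, end)
-- ===== Notes on version B (the rewrite author's own statement) =====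
-- stated objective: idiomatic
-- what changed: The while-loop with mutable state is decomposed into a recursive inner helper on (lo, hi), the flag-and-break row scan is replaced by a single any() over a generator, and the four-way nested update is expressed as pair selection; midpoint rule and +1/-1 updates are kept exactly.
-- outside the precondition, e.g. on binary_search_column(['1', 'x'], 0, 1, 0, 1, True): A returns 0, B returns 0
import Mathlib
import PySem

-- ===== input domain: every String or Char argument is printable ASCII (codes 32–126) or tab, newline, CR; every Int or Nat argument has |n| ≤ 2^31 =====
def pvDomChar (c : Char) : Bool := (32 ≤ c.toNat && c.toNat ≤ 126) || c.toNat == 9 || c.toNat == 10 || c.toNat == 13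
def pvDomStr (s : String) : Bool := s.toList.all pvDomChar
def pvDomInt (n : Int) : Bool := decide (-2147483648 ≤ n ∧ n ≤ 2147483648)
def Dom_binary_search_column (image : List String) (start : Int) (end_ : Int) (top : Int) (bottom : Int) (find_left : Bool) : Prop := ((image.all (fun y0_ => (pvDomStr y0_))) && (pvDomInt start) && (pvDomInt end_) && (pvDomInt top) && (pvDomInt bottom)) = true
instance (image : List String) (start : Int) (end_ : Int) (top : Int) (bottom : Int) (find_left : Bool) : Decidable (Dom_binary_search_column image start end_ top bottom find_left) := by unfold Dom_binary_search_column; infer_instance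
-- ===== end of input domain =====

-- B rewrites A's while-loop as a recursive helper on (lo, hi) with an any() row scan and pair-valued
-- branch selection; same midpoint rule and ±1 updates, same cost (objective: idiomatic decomposition).

-- midpoint step bound used by both ports' termination proofs
theorem pvFd_lt {s e : Int} (h : s < e) :
    0 ≤ PySem.Int.floordiv (e - s) 2 ∧ PySem.Int.floordiv (e - s) 2 < e - s := by
  rw [PySem.Int.floordiv_eq_ediv_of_pos (by omega)]
  omega

-- ===== PORT A =====
-- A's row scan: 'has_black = False; for i in range(top, bottom+1): if image[i][mid] == "1": has_black = True; break'
-- (where Python raises IndexError — pyGet? = none — this port skips the row; Pre_ excludes those inputs)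
def pvA_scan (image : List String) (mid : Int) : List Int → Bool
  | [] => false
  | i :: rest =>
    match PySem.List.pyGet? image i with
    | none => pvA_scan image mid rest
    | some row =>
      match PySem.Str.pyGet? row mid with
      | none => pvA_scan image mid rest
      | some c => if c = '1' then true else pvA_scan image mid rest

-- A's while loop, state (start, end_)
def pvA_loop (image : List String) (top : Int) (bottom : Int) (find_left : Bool) (start : Int) (end_ : Int) : Int :=
  if h : start < end_ then
    let mid := if find_left then start + PySem.Int.floordiv (end_ - start) 2
               else end_ - PySem.Int.floordiv (end_ - start) 2
    let has_black := pvA_scan image mid (PySem.List.pyRange top (bottom + 1) 1)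
    if has_black then
      if find_left then pvA_loop image top bottom find_left start mid
      else pvA_loop image top bottom find_left mid end_
    else
      if find_left then pvA_loop image top bottom find_left (mid + 1) end_
      else pvA_loop image top bottom find_left start (mid - 1)
  else start
termination_by (end_ - start).toNat
decreasing_by
  all_goals
    (have hd := pvFd_lt h
     split_ifs at *
     omega)

def binary_search_column (image : List String) (start : Int) (end_ : Int) (top : Int) (bottom : Int) (find_left : Bool) : Int :=
  pvA_loop image top bottom find_left start end_

-- ===== PORT B =====
-- B's recursive helper go(lo, hi): any() row scan, next (lo, hi) chosen as a pair
def pvB_go (image : List String) (top : Int) (bottom : Int) (find_left : Bool) (lo : Int) (hi : Int) : Int :=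
  if h : lo < hi then
    let mid := if find_left then lo + PySem.Int.floordiv (hi - lo) 2
               else hi - PySem.Int.floordiv (hi - lo) 2
    let hit := (PySem.List.pyRange top (bottom + 1) 1).any fun i =>
      ((PySem.List.pyGet? image i).bind (fun row => PySem.Str.pyGet? row mid)) == some '1'
    let next : Int × Int :=
      if find_left then (if hit then (lo, mid) else (mid + 1, hi))
      else (if hit then (mid, hi) else (lo, mid - 1))
    pvB_go image top bottom find_left next.1 next.2
  else lo
termination_by (hi - lo).toNat
decreasing_by
  have hd := pvFd_lt h
  split_ifs at * <;> simp_all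

def binary_search_column_alt (image : List String) (start : Int) (end_ : Int) (top : Int) (bottom : Int) (find_left : Bool) : Int :=
  pvB_go image top bottom find_left start end_

-- ===== PRECONDITION & SPEC =====
-- Pre_ excludes the IndexError inputs: if the loop runs and scans rows at all, every row index in
-- [top, bottom] must be valid for image and every column index in [start, end_] valid for that row.
-- (Slightly narrower than A's exact domain: A may return despite an invalid unvisited index,
-- e.g. when an early '1' breaks the row scan before the bad index is reached.)
def Pre_binary_search_column (image : List String) (start : Int) (end_ : Int) (top : Int) (bottom : Int) (find_left : Bool) : Prop :=
  start < end_ → top ≤ bottom →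
    -(image.length : Int) ≤ top ∧ bottom < (image.length : Int) ∧
    ∀ i ∈ PySem.List.pyRange top (bottom + 1) 1,
      (Option.any (fun row =>
        decide (-(PySem.Str.len row) ≤ start) && decide (end_ < PySem.Str.len row))
        (PySem.List.pyGet? image i)) = true
instance (image : List String) (start : Int) (end_ : Int) (top : Int) (bottom : Int) (find_left : Bool) : Decidable (Pre_binary_search_column image start end_ top bottom find_left) := by unfold Pre_binary_search_column; infer_instance

def pvWitness_binary_search_column : List String × Int × Int × Int × Int × Bool := (["11"], 0, 1, 0, 0, true)

def Spec_binary_search_column (image : List String) (start : Int) (end_ : Int) (top : Int) (bottom : Int) (find_left : Bool) (out : Int) : Prop := out = binary_search_column_alt image start end_ top bottom find_left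
instance (image : List String) (start : Int) (end_ : Int) (top : Int) (bottom : Int) (find_left : Bool) (out : Int) : Decidable (Spec_binary_search_column image start end_ top bottom find_left out) := by unfold Spec_binary_search_column; infer_instance

-- ===== CLAIM (what is proved, stated in full; the proofs are below) =====
def Claim_equal_binary_search_column : Prop := ∀ (image : List String) (start : Int) (end_ : Int) (top : Int) (bottom : Int) (find_left : Bool), Dom_binary_search_column image start end_ top bottom find_left → Pre_binary_search_column image start end_ top bottom find_left → Spec_binary_search_column image start end_ top bottom find_left (binary_search_column image start end_ top bottom find_left)

-- ===== LEMMAS AND PROOFS =====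

-- A's break-out scan computes the same Bool as B's any()
theorem pvScan_eq_any (image : List String) (mid : Int) (l : List Int) :
    pvA_scan image mid l = l.any
      (fun i => ((PySem.List.pyGet? image i).bind (fun row => PySem.Str.pyGet? row mid)) == some '1') := by
  induction l with
  | nil => rfl
  | cons i rest ih =>
    simp only [pvA_scan, List.any_cons, ih]
    cases hrow : PySem.List.pyGet? image i with
    | none => simp
    | some row =>
      cases hc : PySem.List.pyGet? row.toList mid with
      | none => simp [PySem.Str.pyGet?, hc]
      | some c => by_cases h1 : c = '1' <;> simp [PySem.Str.pyGet?, hc, h1]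

-- the two recursions agree (fuel induction on the interval width)
theorem pvAB_eq_fuel (image : List String) (top bottom : Int) (find_left : Bool) :
    ∀ (n : Nat) (s e : Int), (e - s).toNat ≤ n →
      pvA_loop image top bottom find_left s e = pvB_go image top bottom find_left s e := by
  intro n
  induction n with
  | zero =>
    intro s e hle
    have hse : ¬ s < e := by omega
    rw [pvA_loop, pvB_go]
    simp [hse]
  | succ n ih =>
    intro s e hle
    rw [pvA_loop, pvB_go]
    by_cases hse : s < e
    · have hdd : PySem.Int.floordiv (e - s) 2 = (e - s) / 2 :=
        PySem.Int.floordiv_eq_ediv_of_pos (by omega)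
      simp only [dif_pos hse, ← pvScan_eq_any]
      cases hfl : find_left
      · -- find_left = false
        rw [hfl] at ih
        simp only [Bool.false_eq_true, if_false]
        by_cases hhb : pvA_scan image (e - PySem.Int.floordiv (e - s) 2) (PySem.List.pyRange top (bottom + 1) 1) = true
        · simp only [if_pos hhb]
          apply ih; rw [hdd]; omega
        · simp only [if_neg hhb]
          apply ih; rw [hdd]; omega
      · -- find_left = true
        rw [hfl] at ih
        simp only [if_true]
        by_cases hhb : pvA_scan image (s + PySem.Int.floordiv (e - s) 2) (PySem.List.pyRange top (bottom + 1) 1) = true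
        · simp only [if_pos hhb]
          apply ih; rw [hdd]; omega
        · simp only [if_neg hhb]
          apply ih; rw [hdd]; omega
    · simp [hse]

theorem pvAB_eq (image : List String) (top bottom : Int) (find_left : Bool) (start end_ : Int) :
    pvA_loop image top bottom find_left start end_ = pvB_go image top bottom find_left start end_ :=
  pvAB_eq_fuel image top bottom find_left (end_ - start).toNat start end_ (le_refl _)

-- ===== VERDICT (by name: the statement is the Claim_ definition above) =====
theorem binary_search_column_spec : Claim_equal_binary_search_column := by
  intro image start end_ top bottom find_left _ _
  unfold Spec_binary_search_column binary_search_column binary_search_column_alt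
  exact pvAB_eq image top bottom find_left start end_
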